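-- pv_equiv track=rewrite | github.com/helenakristela/Tucil1_13524109 | src/bruteforce.py | hasil_bruteforce
-- ===== SOURCE A (Python) =====
-- def validasi_input(board):
--     n = len(board)
--     if n == 0:
--         return False
--     for row in board:
--         if len(row) != n:
--             return False
--     for b in range(n):
--         for k in range(n):
--             now = board[b][k]
--             if len(now) != 1 or not('A' <= now <= 'Z'):
--                 return False
--     if n > 26:
--         return False
--     daerah = set_daerah(board)
--     if len(daerah) != n:
--         return False
--     return True
--
-- def set_daerah(board):
--     n = len(board)
--     s = set()
--     for b in range(n):
--         for k in range(n):
--             s.add(board[b][k])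
--     return s
--
-- def cek_daerah(board, queen):
--     daerah = set()
--     for (b,k) in queen:
--         now = board[b][k]
--         if now in daerah: return False
--         daerah.add(now)
--     return True
--
-- def cek_tetangga(queen):
--     posisi_queen = set(queen)
--     for b, k in queen:
--         if (b-1, k-1) in posisi_queen or (b-1, k) in posisi_queen or (b-1, k+1) in posisi_queen or (b, k-1) in posisi_queen or (b, k+1) in posisi_queen or (b+1, k-1) in posisi_queen or (b+1, k) in posisi_queen or (b+1, k+1) in posisi_queen: return False
--     return True
--
-- def cek_kolom_baris(queen, n):
--     if len(queen) != n : return False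
--     baris = set()
--     kolom = set()
--     for (b,k) in queen:
--         if b in baris or k in kolom: return False
--         baris.add(b)
--         kolom.add(k)
--     return True
--
-- def bangun_permutasi(array):
--     i = len(array) - 2
--     while i>=0 and array[i]>=array[i+1]: i -= 1
--     if i < 0 : return False
--     j = len(array) - 1
--     while array[j]<=array[i]: j -= 1
--     temp = array[i]
--     array[i] = array[j]
--     array[j] = temp
--     kiri = i + 1
--     kanan = len(array) - 1
--     while kiri < kanan:
--         temp = array[kiri]
--         array[kiri] = array[kanan]
--         array[kanan] = temp
--         kiri += 1
--         kanan -= 1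
--     return True
--
-- def semua_kemungkinan(n):
--     permutasi = list(range(n))
--     yield permutasi[:]
--     while bangun_permutasi(permutasi): yield permutasi[:]
--
-- def hasil_bruteforce(board, skip_time=False):
--     if not skip_time and not validasi_input(board): return None, 0
--     n = len(board)
--     kasus = 0
--     for permutasi in semua_kemungkinan(n):
--         kasus += 1
--         queen = [(r,permutasi[r]) for r in range(n)]
--         if cek_daerah(board,queen) and cek_tetangga(queen) and cek_kolom_baris(queen,n): return queen, kasus
--     return None, kasus
-- ===== SOURCE B (Python) =====
-- def validasi_input(board):
--     n = len(board)
--     if n == 0: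
--         return False
--     for row in board:
--         if len(row) != n:
--             return False
--     for b in range(n):
--         for k in range(n):
--             now = board[b][k]
--             if len(now) != 1 or not('A' <= now <= 'Z'):
--                 return False
--     if n > 26:
--         return False
--     daerah = set()
--     for b in range(n):
--         for k in range(n):
--             daerah.add(board[b][k])
--     if len(daerah) != n:
--         return False
--     return True
--
-- def hasil_bruteforce(board, skip_time=False):
--     # Recursive lexicographic backtracking over the remaining columns (instead of
--     # iterating an in-place next-permutation successor); a full placement is valid
--     # iff consecutive rows differ in column by more than 1 and the n region labels
--     # are distinct (a permutation already has distinct rows and columns).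
--     if not skip_time and not validasi_input(board):
--         return None, 0
--     n = len(board)
--
--     def solve(prefix, remaining, kasus):
--         if not remaining:
--             kasus += 1
--             if all(abs(prefix[r] - prefix[r + 1]) > 1 for r in range(n - 1)) \
--                and len({board[r][prefix[r]] for r in range(n)}) == n:
--                 return [(r, prefix[r]) for r in range(n)], kasus
--             return None, kasus
--         for idx in range(len(remaining)):
--             res, kasus = solve(prefix + [remaining[idx]],
--                                remaining[:idx] + remaining[idx + 1:], kasus)
--             if res is not None:
--                 return res, kasus
--         return None, kasus
--
--     return solve([], list(range(n)), 0)
-- ===== Notes on version B (the rewrite author's own statement) =====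
-- stated objective: alternative
-- what changed: B enumerates candidate placements by recursive lexicographic backtracking over the list of remaining columns (building each permutation by choosing the next column from what is left) instead of A's iterative in-place next-permutation successor loop, and tests a full placement with a consecutive-row column-difference scan plus a distinct-count of the n region labels instead of A's three set-based passes (region set, 8-direction neighbour probing of a position set, row/column sets).
-- outside the precondition, e.g. on hasil_bruteforce([['A', 'A', 'A'], ['A', 'A', 'A'], ['A']], True): A returns (None, 6), B returns (None, 6)
import Mathlib
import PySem

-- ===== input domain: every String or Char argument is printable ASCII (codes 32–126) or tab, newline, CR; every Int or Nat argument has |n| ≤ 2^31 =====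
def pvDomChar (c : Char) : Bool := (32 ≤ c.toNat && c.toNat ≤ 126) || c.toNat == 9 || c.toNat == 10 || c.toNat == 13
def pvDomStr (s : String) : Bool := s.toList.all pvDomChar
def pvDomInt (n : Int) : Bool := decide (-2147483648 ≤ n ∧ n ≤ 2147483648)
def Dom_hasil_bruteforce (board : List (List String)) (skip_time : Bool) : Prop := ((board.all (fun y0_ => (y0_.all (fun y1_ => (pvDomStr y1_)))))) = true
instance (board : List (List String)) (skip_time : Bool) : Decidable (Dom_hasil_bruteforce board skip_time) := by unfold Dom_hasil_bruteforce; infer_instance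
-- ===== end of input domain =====

-- B enumerates placements by recursive lexicographic backtracking over the remaining columns
-- (instead of A's iterative in-place next-permutation loop) and tests a placement with a
-- consecutive-row column-difference scan plus a distinct-count of the region labels.

-- ===== PORT A =====

-- board[b][k]; the total pyGetD form is exact on Pre_ (every index actually used is in range there)
def pvCell (board : List (List String)) (b k : Int) : String :=
  PySem.List.pyGetD (PySem.List.pyGetD board b []) k ""

-- len(now) != 1 or not('A' <= now <= 'Z'): the comparison is only reached on single-char strings,
-- where Python's lexicographic string compare is exactly the char-range test.
def pvCellOk (s : String) : Bool :=
  match s.toList with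
  | [c] => decide ('A' ≤ c ∧ c ≤ 'Z')
  | _ => false

-- set_daerah (helper of validasi_input in both Pythons)
def pvSetDaerah (board : List (List String)) (n : Nat) : PySem.Set String :=
  (List.range n).foldl
    (fun s b => (List.range n).foldl (fun s k => PySem.Set.add s (pvCell board b k)) s)
    PySem.Set.empty

-- validasi_input (identical helper in both Pythons)
def validasi_input (board : List (List String)) : Bool :=
  let n := board.length
  if n == 0 then false
  else if !(board.all (fun row => row.length == n)) then false
  else if !((List.range n).all (fun b => (List.range n).all (fun k => pvCellOk (pvCell board b k)))) then false
  else if 26 < n then false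
  else if !(PySem.Set.len (pvSetDaerah board n) == (n : Int)) then false
  else true

-- bangun_permutasi: the three while loops, transliterated as structural countdowns.
-- pvGoI a k encodes the first loop with python i = k - 1 (k = 0 means i < 0, i.e. return False).
def pvGoI (a : List Int) : Nat → Option Nat
  | 0 => none
  | k+1 => if a.getD k 0 ≥ a.getD (k+1) 0 then pvGoI a k else some k

-- second loop: decrement j while a[j] <= a[i]; it always stops at some j > i in Python
def pvGoJ (a : List Int) (i : Nat) : Nat → Nat
  | 0 => 0
  | j+1 => if a.getD (j+1) 0 ≤ a.getD i 0 then pvGoJ a i j else j+1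

-- third loop: two-pointer in-place reversal of the suffix
def pvRevLoop (a : List Int) (kiri kanan : Nat) : List Int :=
  if kiri < kanan then
    pvRevLoop ((a.set kiri (a.getD kanan 0)).set kanan (a.getD kiri 0)) (kiri+1) (kanan-1)
  else a
termination_by kanan - kiri
decreasing_by omega

-- returns some next-array instead of mutating (True ↦ some, False ↦ none)
def bangun_permutasi (a : List Int) : Option (List Int) :=
  match pvGoI a (a.length - 1) with
  | none => none
  | some i =>
      let j := pvGoJ a i (a.length - 1)
      let a' := (a.set i (a.getD j 0)).set j (a.getD i 0)
      some (pvRevLoop a' (i+1) (a'.length - 1))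

-- queen = [(r, permutasi[r]) for r in range(n)]
def pvQueen (perm : List Int) (n : Nat) : List (Int × Int) :=
  (PySem.List.pyRange 0 (n : Int) 1).map (fun r => (r, PySem.List.pyGetD perm r 0))

def pvCekDaerahAux (board : List (List String)) : List (Int × Int) → PySem.Set String → Bool
  | [], _ => true
  | (b, k) :: rest, s =>
      let now := pvCell board b k
      if PySem.Set.contains s now then false
      else pvCekDaerahAux board rest (PySem.Set.add s now)

def cek_daerah (board : List (List String)) (queen : List (Int × Int)) : Bool :=
  pvCekDaerahAux board queen PySem.Set.empty

def pvProbe (pos : PySem.Set (Int × Int)) (b k : Int) : Bool :=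
  PySem.Set.contains pos (b-1, k-1) || PySem.Set.contains pos (b-1, k) ||
  PySem.Set.contains pos (b-1, k+1) || PySem.Set.contains pos (b, k-1) ||
  PySem.Set.contains pos (b, k+1) || PySem.Set.contains pos (b+1, k-1) ||
  PySem.Set.contains pos (b+1, k) || PySem.Set.contains pos (b+1, k+1)

def pvCekTetanggaAux (pos : PySem.Set (Int × Int)) : List (Int × Int) → Bool
  | [] => true
  | (b, k) :: rest => if pvProbe pos b k then false else pvCekTetanggaAux pos rest

def cek_tetangga (queen : List (Int × Int)) : Bool :=
  pvCekTetanggaAux (PySem.Set.ofList queen) queen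

def pvCekKBAux : List (Int × Int) → PySem.Set Int → PySem.Set Int → Bool
  | [], _, _ => true
  | (b, k) :: rest, baris, kolom =>
      if PySem.Set.contains baris b || PySem.Set.contains kolom k then false
      else pvCekKBAux rest (PySem.Set.add baris b) (PySem.Set.add kolom k)

def cek_kolom_baris (queen : List (Int × Int)) (n : Nat) : Bool :=
  if queen.length ≠ n then false else pvCekKBAux queen PySem.Set.empty PySem.Set.empty

-- the for-loop over semua_kemungkinan(n); fuel n! bounds the ≤ n! next-permutation steps
-- from the ascending start, so it is never exhausted on an actual run
def pvLoopA (board : List (List String)) (n : Nat) :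
    Nat → List Int → Int → (Option (List (Int × Int))) × Int
  | 0, _, kasus => (none, kasus)
  | fuel+1, perm, kasus =>
      let kasus := kasus + 1
      let queen := pvQueen perm n
      if cek_daerah board queen && cek_tetangga queen && cek_kolom_baris queen n then
        (some queen, kasus)
      else
        match bangun_permutasi perm with
        | none => (none, kasus)
        | some p => pvLoopA board n fuel p kasus

def hasil_bruteforce (board : List (List String)) (skip_time : Bool) :
    (Option (List (Int × Int))) × Int :=
  if !skip_time && !validasi_input board then (none, 0)
  else
    pvLoopA board board.length (Nat.factorial board.length)
      (PySem.List.pyRange 0 (board.length : Int) 1) 0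

-- ===== PORT B =====

-- all(abs(prefix[r] - prefix[r+1]) > 1 for r in range(n - 1))
def pvAdjOk (perm : List Int) (n : Nat) : Bool :=
  (PySem.List.pyRange 0 ((n : Int) - 1) 1).all
    (fun r => decide (1 < (PySem.List.pyGetD perm r 0 - PySem.List.pyGetD perm (r+1) 0).natAbs))

-- labels {board[r][prefix[r]] for r in range(n)} (as the list the set is built from)
def pvLabels (board : List (List String)) (perm : List Int) (n : Nat) : List String :=
  (PySem.List.pyRange 0 (n : Int) 1).map (fun r => pvCell board r (PySem.List.pyGetD perm r 0))

-- solve(prefix, remaining, kasus): the 'for idx in range(len(remaining))' loop is carried as the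
-- split remaining = left ++ right (left = remaining[:idx] already tried, right still to try);
-- entry is always (left, right) = ([], remaining), so ([], []) is Python's empty-remaining leaf.
def pvSolve (board : List (List String)) (n : Nat) :
    List Int → List Int → List Int → Int → (Option (List (Int × Int))) × Int
  | pre, [], [], kasus =>
      let kasus := kasus + 1
      if pvAdjOk pre n &&
         (PySem.Set.len (PySem.Set.ofList (pvLabels board pre n)) == (n : Int)) then
        (some ((PySem.List.pyRange 0 (n : Int) 1).map (fun r => (r, PySem.List.pyGetD pre r 0))),
          kasus)
      else (none, kasus)
  | _, _ :: _, [], kasus => (none, kasus)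
  | pre, left, c :: rs, kasus =>
      match pvSolve board n (pre ++ [c]) [] (left ++ rs) kasus with
      | (some q, k) => (some q, k)
      | (none, k) => pvSolve board n pre (left ++ [c]) rs k
termination_by pre left right kasus => (left.length + right.length, right.length)
decreasing_by
  · simp [List.length_append]; omega
  · simp [List.length_append]; omega

def hasil_bruteforce_alt (board : List (List String)) (skip_time : Bool) :
    (Option (List (Int × Int))) × Int :=
  if !skip_time && !validasi_input board then (none, 0)
  else
    pvSolve board board.length [] []
      (PySem.List.pyRange 0 (board.length : Int) 1) 0

-- ===== PRECONDITION & SPEC =====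

-- Pre_ excludes skip_time=True boards having a row shorter than len(board): queen-cell indexing
-- board[r][perm[r]] can raise IndexError there, and whether A raises or still returns depends only
-- on which cells its short-circuiting scans happen to touch (see the cite in claim.json).
def Pre_hasil_bruteforce (board : List (List String)) (skip_time : Bool) : Prop :=
  skip_time = true → ∀ row ∈ board, board.length ≤ row.length

instance (board : List (List String)) (skip_time : Bool) : Decidable (Pre_hasil_bruteforce board skip_time) := by
  unfold Pre_hasil_bruteforce; infer_instance

def pvWitness_hasil_bruteforce : List (List String) × Bool := ([["A", "B"], ["B", "A"]], false)

def Spec_hasil_bruteforce (board : List (List String)) (skip_time : Bool)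
    (out : (Option (List (Int × Int))) × Int) : Prop :=
  out = hasil_bruteforce_alt board skip_time

instance (board : List (List String)) (skip_time : Bool) (out : (Option (List (Int × Int))) × Int) :
    Decidable (Spec_hasil_bruteforce board skip_time out) := by
  unfold Spec_hasil_bruteforce; infer_instance

-- ===== CLAIM (what is proved, stated in full; the proofs are below) =====
def Claim_equal_hasil_bruteforce : Prop :=
  ∀ (board : List (List String)) (skip_time : Bool),
    Dom_hasil_bruteforce board skip_time → Pre_hasil_bruteforce board skip_time →
      Spec_hasil_bruteforce board skip_time (hasil_bruteforce board skip_time)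

-- ===== LEMMAS AND PROOFS =====

-- step relation of A's generator: one next-permutation step
def PvStep (p q : List Int) : Prop := bangun_permutasi p = some q

-- B's validity test on a full permutation (the leaf test of pvSolve)
def pvCheckB (board : List (List String)) (n : Nat) (p : List Int) : Bool :=
  pvAdjOk p n && (PySem.Set.len (PySem.Set.ofList (pvLabels board p n)) == (n : Int))

-- scanning a list of candidate permutations, counting each, stopping at the first valid one
def pvScan (board : List (List String)) (n : Nat) :
    List (List Int) → Int → (Option (List (Int × Int))) × Int
  | [], kasus => (none, kasus)
  | p :: rest, kasus =>
      if pvCheckB board n p then (some (pvQueen p n), kasus + 1)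
      else pvScan board n rest (kasus + 1)

-- all permutations of s in lexicographic order (for sorted s), in the block shape
-- pvSolve's loop produces: pvBlocks left right = permutations of left ++ right whose
-- first element is taken from right, grouped by that element in right's order
mutual
def pvPermsOf : List Int → List (List Int)
  | [] => [[]]
  | c :: rs => pvBlocks [] (c :: rs)
  termination_by s => (s.length, s.length + 1)
def pvBlocks : List Int → List Int → List (List Int)
  | _, [] => []
  | left, c :: rs => (pvPermsOf (left ++ rs)).map (fun q => c :: q) ++ pvBlocks (left ++ [c]) rs
  termination_by left right => (left.length + right.length, right.length)
  decreasing_by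
    · apply Prod.Lex.left
      simp only [List.length_append, List.length_nil, List.length_cons]
      omega
    · have h : (left ++ [c]).length + rs.length = left.length + (c :: rs).length := by
        simp only [List.length_append, List.length_nil, List.length_cons]
        omega
      rw [h]
      exact Prod.Lex.right _ (by simp)
end

-- the completions still to be tried from loop state (left, right)
def pvCompl : List Int → List Int → List (List Int)
  | [], right => pvPermsOf right
  | left@(_ :: _), right => pvBlocks left right

lemma pvCompl_cons (left : List Int) (c : Int) (rs : List Int) :
    pvCompl left (c :: rs) =
      (pvPermsOf (left ++ rs)).map (fun q => c :: q) ++ pvBlocks (left ++ [c]) rs := by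
  cases left with
  | nil => simp only [pvCompl, pvPermsOf, pvBlocks, List.nil_append]
  | cons a l => simp only [pvCompl, pvBlocks]

lemma pvCompl_ne_nil (left right : List Int) (h : left ≠ []) : pvCompl left right = pvBlocks left right := by
  cases left with
  | nil => exact absurd rfl h
  | cons a l => simp only [pvCompl]

lemma pvPermsOf_nil : pvPermsOf [] = [[]] := by rw [pvPermsOf]

lemma pvPermsOf_cons (c : Int) (rs : List Int) : pvPermsOf (c :: rs) = pvBlocks [] (c :: rs) := by
  rw [pvPermsOf]

lemma pvBlocks_cons (left : List Int) (c : Int) (rs : List Int) :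
    pvBlocks left (c :: rs) =
      (pvPermsOf (left ++ rs)).map (fun q => c :: q) ++ pvBlocks (left ++ [c]) rs := by
  rw [pvBlocks]

lemma pvBlocks_nil (left : List Int) : pvBlocks left [] = [] := by rw [pvBlocks]

lemma pvScan_append (board : List (List String)) (n : Nat) :
    ∀ (L1 L2 : List (List Int)) (kasus : Int),
      pvScan board n (L1 ++ L2) kasus =
        match pvScan board n L1 kasus with
        | (some q, k) => (some q, k)
        | (none, k) => pvScan board n L2 k := by
  intro L1
  induction L1 with
  | nil => intro L2 kasus; rfl
  | cons p rest ih =>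
      intro L2 kasus
      rw [List.cons_append, pvScan, pvScan]
      by_cases h : pvCheckB board n p = true
      · rw [if_pos h, if_pos h]
      · rw [if_neg h, if_neg h, ih]

-- ---------- next-permutation micro-lemmas ----------

lemma pvGoI_succ (a : List Int) (k : Nat) :
    pvGoI a (k+1) = if a.getD k 0 ≥ a.getD (k+1) 0 then pvGoI a k else some k := rfl

lemma pvGoJ_succ (a : List Int) (i j : Nat) :
    pvGoJ a i (j+1) = if a.getD (j+1) 0 ≤ a.getD i 0 then pvGoJ a i j else j+1 := rfl

lemma pvGoI_le : ∀ (a : List Int) (k i : Nat), pvGoI a k = some i → i + 1 ≤ k := by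
  intro a k
  induction k with
  | zero => intro i h; simp [pvGoI] at h
  | succ k ih =>
    intro i h
    rw [pvGoI_succ] at h
    by_cases hc : a.getD k 0 ≥ a.getD (k+1) 0
    · rw [if_pos hc] at h; have := ih i h; omega
    · rw [if_neg hc] at h; injection h with h'; omega

lemma pvGoI_lt : ∀ (a : List Int) (k i : Nat), pvGoI a k = some i → a.getD i 0 < a.getD (i+1) 0 := by
  intro a k
  induction k with
  | zero => intro i h; simp [pvGoI] at h
  | succ k ih =>
    intro i h
    rw [pvGoI_succ] at h
    by_cases hc : a.getD k 0 ≥ a.getD (k+1) 0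
    · rw [if_pos hc] at h; exact ih i h
    · rw [if_neg hc] at h; injection h with h'; subst h'; omega

lemma pvGoI_none (a : List Int) : ∀ k, (∀ m, m < k → a.getD (m+1) 0 ≤ a.getD m 0) → pvGoI a k = none := by
  intro k
  induction k with
  | zero => intro _; rfl
  | succ k ih =>
    intro h
    rw [pvGoI_succ, if_pos (h k (by omega))]
    exact ih (fun m hm => h m (by omega))

lemma pvGoI_some_zero (a : List Int) :
    ∀ k, 1 ≤ k → (∀ m, 1 ≤ m → m < k → a.getD (m+1) 0 ≤ a.getD m 0) →
      a.getD 0 0 < a.getD 1 0 → pvGoI a k = some 0 := by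
  intro k
  induction k with
  | zero => omega
  | succ k ih =>
    intro _ h h01
    by_cases hk : 1 ≤ k
    · rw [pvGoI_succ, if_pos (h k hk (by omega))]
      exact ih hk (fun m h1 h2 => h m h1 (by omega)) h01
    · have hk0 : k = 0 := by omega
      subst hk0
      rw [pvGoI_succ, if_neg (by simpa using not_le.mpr h01)]

lemma pvGoI_cons_some (x : Int) (p : List Int) :
    ∀ k i, pvGoI p k = some i → pvGoI (x :: p) (k+1) = some (i+1) := by
  intro k
  induction k with
  | zero => intro i h; simp [pvGoI] at h
  | succ k ih =>
    intro i h
    rw [pvGoI_succ] at h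
    rw [pvGoI_succ]
    by_cases hc : p.getD k 0 ≥ p.getD (k+1) 0
    · rw [if_pos hc] at h
      rw [if_pos (by simpa [List.getD_cons_succ] using hc)]
      exact ih i h
    · rw [if_neg hc] at h
      injection h with h'; subst h'
      rw [if_neg (by simpa [List.getD_cons_succ] using hc)]

lemma pvGoJ_skip (a : List Int) (i : Nat) :
    ∀ t j, (∀ m, j < m → m ≤ j + t → a.getD m 0 ≤ a.getD i 0) → pvGoJ a i (j + t) = pvGoJ a i j := by
  intro t
  induction t with
  | zero => intro j _; rfl
  | succ t ih =>
    intro j h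
    have he : j + (t+1) = (j+t) + 1 := by omega
    rw [he, pvGoJ_succ, if_pos (h (j+t+1) (by omega) (by omega))]
    exact ih j (fun m hm1 hm2 => h m hm1 (by omega))

lemma pvGoJ_cons (x : Int) (p : List Int) (i : Nat) :
    ∀ j, (∃ m, m ≤ j ∧ p.getD i 0 < p.getD m 0) →
      pvGoJ (x :: p) (i+1) (j+1) = pvGoJ p i j + 1 := by
  intro j
  induction j with
  | zero =>
    rintro ⟨m, hm, hlt⟩
    have hm0 : m = 0 := by omega
    subst hm0
    rw [pvGoJ_succ, if_neg (by simpa [List.getD_cons_succ] using not_le.mpr hlt)]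
    rfl
  | succ j ih =>
    rintro ⟨m, hm, hlt⟩
    rw [pvGoJ_succ]
    by_cases hc : p.getD (j+1) 0 ≤ p.getD i 0
    · rw [if_pos (by simpa [List.getD_cons_succ] using hc)]
      rw [show pvGoJ p i (j+1) = pvGoJ p i j from by rw [pvGoJ_succ, if_pos hc]]
      apply ih
      refine ⟨m, ?_, hlt⟩
      rcases Nat.lt_or_ge m (j+1) with h' | h'
      · omega
      · have : m = j + 1 := by omega
        subst this
        exact absurd hc (not_le.mpr hlt)
    · rw [if_neg (by simpa [List.getD_cons_succ] using hc)]
      rw [show pvGoJ p i (j+1) = j+1 from by rw [pvGoJ_succ, if_neg hc]]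

lemma pvRevLoop_cons (x : Int) :
    ∀ (t : List Int) (k r : Nat), pvRevLoop (x :: t) (k+1) (r+1) = x :: pvRevLoop t k r := by
  intro t k r
  induction t, k, r using pvRevLoop.induct with
  | case1 a k r h ih =>
    conv_lhs => rw [pvRevLoop]
    conv_rhs => rw [pvRevLoop]
    rw [if_pos (show k + 1 < r + 1 by omega), if_pos h]
    have hr : r + 1 - 1 = (r - 1) + 1 := by omega
    simp only [List.getD_cons_succ, List.set_cons_succ, hr]
    exact ih
  | case2 a k r h =>
    conv_lhs => rw [pvRevLoop]
    conv_rhs => rw [pvRevLoop]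
    rw [if_neg (show ¬ (k + 1 < r + 1) by omega), if_neg h]

lemma pvRevSeg : ∀ (N : Nat) (m p q : List Int), m.length ≤ N →
    pvRevLoop (p ++ m ++ q) p.length (p.length + m.length - 1) = p ++ m.reverse ++ q := by
  intro N
  induction N with
  | zero =>
    intro m p q hm
    have : m = [] := List.eq_nil_of_length_eq_zero (by omega)
    subst this
    rw [pvRevLoop, if_neg (by simp)]
    simp
  | succ N ih =>
    intro m p q hm
    match m with
    | [] =>
      rw [pvRevLoop, if_neg (by simp)]
      simp
    | [y] =>
      rw [pvRevLoop, if_neg (by simp)]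
      simp
    | y :: m1 :: m2 =>
      obtain ⟨mid, w, hmw⟩ : ∃ mid w, m1 :: m2 = mid ++ [w] := by
        rcases List.eq_nil_or_concat (m1 :: m2) with h | ⟨mid, w, h⟩
        · cases h
        · exact ⟨mid, w, by simpa [List.concat_eq_append] using h⟩
      rw [hmw]
      have hlm : (y :: (mid ++ [w])).length = mid.length + 2 := by simp
      have hidx : p.length + (y :: (mid ++ [w])).length - 1 = p.length + mid.length + 1 := by
        simp; omega
      rw [pvRevLoop, if_pos (by rw [hidx]; omega)]
      rw [hidx]
      -- getD at the two pointer positions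
      have hlist : p ++ (y :: (mid ++ [w])) ++ q = p ++ y :: (mid ++ [w] ++ q) := by simp
      have hgL : (p ++ (y :: (mid ++ [w])) ++ q).getD p.length 0 = y := by
        rw [hlist, List.getD_append_right _ _ _ _ (le_refl _)]
        simp
      have hlist2 : p ++ (y :: (mid ++ [w])) ++ q = (p ++ y :: mid) ++ ([w] ++ q) := by simp
      have hgR : (p ++ (y :: (mid ++ [w])) ++ q).getD (p.length + mid.length + 1) 0 = w := by
        rw [hlist2, List.getD_append_right _ _ _ _ (by simp; omega)]
        simp
      rw [hgL, hgR]
      -- the two writes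
      have hset1 : (p ++ (y :: (mid ++ [w])) ++ q).set p.length w
          = p ++ (w :: (mid ++ [w])) ++ q := by
        rw [hlist, List.set_append_right _ _ (le_refl _)]
        simp
      have hset2 : (p ++ (w :: (mid ++ [w])) ++ q).set (p.length + mid.length + 1) y
          = p ++ (w :: (mid ++ [y])) ++ q := by
        have h1 : p ++ (w :: (mid ++ [w])) ++ q = (p ++ w :: mid) ++ ([w] ++ q) := by simp
        have h2 : p.length + mid.length + 1 = (p ++ w :: mid).length := by simp; omega
        rw [h1, h2, List.set_append_right _ _ (le_refl _)]
        simp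
      rw [hset1, hset2]
      -- recurse on the middle
      have h3 : p ++ (w :: (mid ++ [y])) ++ q = (p ++ [w]) ++ mid ++ ([y] ++ q) := by simp
      have h4 : p.length + 1 = (p ++ [w]).length := by simp
      have h5 : p.length + mid.length + 1 - 1 = (p ++ [w]).length + mid.length - 1 := by
        simp
      rw [h3, h4, h5, ih mid (p ++ [w]) ([y] ++ q)
        (by have := congrArg List.length hmw; simp at this hm; omega)]
      simp

lemma bangun_some (a : List Int) (i : Nat) (h : pvGoI a (a.length - 1) = some i) :
    bangun_permutasi a = some (pvRevLoop
      ((a.set i (a.getD (pvGoJ a i (a.length - 1)) 0)).set (pvGoJ a i (a.length - 1)) (a.getD i 0))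
      (i+1)
      (((a.set i (a.getD (pvGoJ a i (a.length - 1)) 0)).set (pvGoJ a i (a.length - 1)) (a.getD i 0)).length - 1)) := by
  rw [bangun_permutasi, h]

lemma bangun_desc_none (a : List Int) (h : List.Pairwise (· > ·) a) : bangun_permutasi a = none := by
  have hI : pvGoI a (a.length - 1) = none := by
    apply pvGoI_none
    intro m hm
    have h1 : m < a.length := by omega
    have h2 : m + 1 < a.length := by omega
    rw [List.getD_eq_getElem a 0 h1, List.getD_eq_getElem a 0 h2]
    exact le_of_lt (List.pairwise_iff_getElem.mp h m (m+1) h1 h2 (by omega))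
  rw [bangun_permutasi, hI]

lemma bangun_desc_step (x z : Int) (gs ls : List Int)
    (hpw : List.Pairwise (· > ·) (gs ++ [z] ++ ls))
    (hgs : ∀ y ∈ gs ++ [z], x < y) (hls : ∀ y ∈ ls, y < x) :
    bangun_permutasi (x :: (gs ++ [z] ++ ls)) = some (z :: (ls.reverse ++ [x] ++ gs.reverse)) := by
  have hdlen : (gs ++ [z] ++ ls).length = gs.length + ls.length + 1 := by simp; omega
  have halen : (x :: (gs ++ [z] ++ ls)).length - 1 = gs.length + ls.length + 1 := by simp; omega
  have hpwE := List.pairwise_iff_getElem.mp hpw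
  -- the descending suffix read through getD
  have hgetm : ∀ m : Nat, (hm : m < gs.length + ls.length + 1) →
      (gs ++ [z] ++ ls).getD m 0 = (gs ++ [z] ++ ls)[m]'(by simp; omega) := by
    intro m hm
    exact List.getD_eq_getElem _ 0 (by simp; omega)
  have hz : (x :: (gs ++ [z] ++ ls)).getD (gs.length + 1) 0 = z := by
    rw [List.getD_cons_succ, hgetm gs.length (by omega)]
    rw [List.getElem_append_left (by simp)]
    exact List.getElem_concat_length rfl _
  have hxz : x < z := hgs z (by simp)
  have hI : pvGoI (x :: (gs ++ [z] ++ ls)) ((x :: (gs ++ [z] ++ ls)).length - 1) = some 0 := by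
    rw [halen]
    apply pvGoI_some_zero _ _ (by omega)
    · intro m h1 hm
      obtain ⟨m', rfl⟩ : ∃ m', m = m' + 1 := ⟨m - 1, by omega⟩
      rw [List.getD_cons_succ, List.getD_cons_succ, hgetm (m'+1) (by omega), hgetm m' (by omega)]
      exact le_of_lt (hpwE m' (m'+1) (by omega) (by omega) (by omega))
    · rw [List.getD_cons_zero, List.getD_cons_succ, hgetm 0 (by omega)]
      have h0 : (gs ++ [z] ++ ls)[0]'(by omega) = (gs ++ [z])[0]'(by simp) := by
        exact List.getElem_append_left (by simp)
      rw [h0]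
      exact hgs _ (List.getElem_mem _)
  have hJ : pvGoJ (x :: (gs ++ [z] ++ ls)) 0 ((x :: (gs ++ [z] ++ ls)).length - 1)
      = gs.length + 1 := by
    rw [halen, show gs.length + ls.length + 1 = (gs.length + 1) + ls.length from by omega]
    rw [pvGoJ_skip _ 0 ls.length (gs.length + 1) ?_]
    · rw [pvGoJ_succ, if_neg (by rw [hz, List.getD_cons_zero]; exact not_le.mpr hxz)]
    · intro m hm1 hm2
      obtain ⟨m', rfl⟩ : ∃ m', m = m' + 1 := ⟨m - 1, by omega⟩
      rw [List.getD_cons_succ, List.getD_cons_zero, hgetm m' (by omega)]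
      have hsplit : (gs ++ [z] ++ ls)[m']'(by simp; omega) = ls[m' - (gs.length + 1)]'(by omega) := by
        rw [List.getElem_append_right (by simp; omega)]
        simp
      rw [hsplit]
      exact le_of_lt (hls _ (List.getElem_mem _))
  have hx0 : (x :: (gs ++ [z] ++ ls)).getD 0 0 = x := List.getD_cons_zero
  have hswap : ((x :: (gs ++ [z] ++ ls)).set 0 z).set (gs.length + 1) x
      = z :: ((gs ++ [x]) ++ ls) := by
    rw [List.set_cons_zero, List.set_cons_succ]
    congr 1
    rw [List.set_append_left _ _ (by simp)]
    congr 1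
    rw [List.set_append_right _ _ (le_refl _)]
    simp
  rw [bangun_some _ 0 hI, hJ, hx0, hz, hswap]
  have hlen4 : (z :: ((gs ++ [x]) ++ ls)).length - 1 = gs.length + ls.length + 1 := by simp; omega
  rw [show (0:Nat) + 1 = 1 from rfl, hlen4]
  have hseg := pvRevSeg ((gs ++ [x]) ++ ls).length ((gs ++ [x]) ++ ls) [z] []
    (le_refl _)
  simp only [List.append_nil, List.singleton_append, List.length_singleton] at hseg
  rw [show gs.length + ls.length + 1 = 1 + ((gs ++ [x]) ++ ls).length - 1 from by simp; omega]
  rw [hseg]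
  simp

lemma bangun_cons (x : Int) (p q : List Int) (h : bangun_permutasi p = some q) :
    bangun_permutasi (x :: p) = some (x :: q) := by
  obtain ⟨i, hI⟩ : ∃ i, pvGoI p (p.length - 1) = some i := by
    cases hI : pvGoI p (p.length - 1) with
    | none => rw [bangun_permutasi, hI] at h; cases h
    | some i => exact ⟨i, rfl⟩
  rw [bangun_some p i hI] at h
  have hq := Option.some.inj h
  have hile := pvGoI_le p _ i hI
  have hplen : 2 ≤ p.length := by omega
  have hk : p.length - 1 + 1 = p.length := by omega
  have hxlen : (x :: p).length - 1 = p.length := by simp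
  have hI' : pvGoI (x :: p) ((x :: p).length - 1) = some (i + 1) := by
    rw [hxlen, ← hk]
    exact pvGoI_cons_some x p _ i hI
  have hJ' : pvGoJ (x :: p) (i + 1) ((x :: p).length - 1) = pvGoJ p i (p.length - 1) + 1 := by
    rw [hxlen, ← hk]
    exact pvGoJ_cons x p i _ ⟨i + 1, by omega, pvGoI_lt p _ i hI⟩
  rw [bangun_some (x :: p) (i + 1) hI', hJ']
  have hsets : ((x :: p).set (i+1) ((x :: p).getD (pvGoJ p i (p.length - 1) + 1) 0)).set
        (pvGoJ p i (p.length - 1) + 1) ((x :: p).getD (i+1) 0)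
      = x :: ((p.set i (p.getD (pvGoJ p i (p.length - 1)) 0)).set
          (pvGoJ p i (p.length - 1)) (p.getD i 0)) := by
    simp [List.set_cons_succ]
  rw [hsets]
  have hlen2 : (x :: ((p.set i (p.getD (pvGoJ p i (p.length - 1)) 0)).set
        (pvGoJ p i (p.length - 1)) (p.getD i 0))).length - 1
      = (p.length - 1) + 1 := by simp [hk]
  rw [hlen2, pvRevLoop_cons]
  have hlen3 : ((p.set i (p.getD (pvGoJ p i (p.length - 1)) 0)).set
        (pvGoJ p i (p.length - 1)) (p.getD i 0)).length - 1 = p.length - 1 := by simp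
  rw [hlen3] at hq
  rw [hq]

-- ---------- A-side check equals B-side check on a duplicate-free permutation ----------

lemma mem_pvQueen (perm : List Int) (n : Nat) (x y : Int) :
    (x, y) ∈ pvQueen perm n ↔ 0 ≤ x ∧ x < (n : Int) ∧ y = PySem.List.pyGetD perm x 0 := by
  simp only [pvQueen, List.mem_map, PySem.List.mem_pyRange_one, Prod.mk.injEq]
  constructor
  · rintro ⟨r, ⟨h0, h1⟩, rfl, rfl⟩
    exact ⟨h0, h1, rfl⟩
  · rintro ⟨h0, h1, rfl⟩
    exact ⟨x, ⟨h0, h1⟩, rfl, rfl⟩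

lemma daerahAux_iff (board : List (List String)) :
    ∀ (qs : List (Int × Int)) (s : PySem.Set String),
      pvCekDaerahAux board qs s = true ↔
        ((qs.map (fun p => pvCell board p.1 p.2)).Nodup ∧
          ∀ x ∈ qs.map (fun p => pvCell board p.1 p.2), x ∉ s) := by
  intro qs
  induction qs with
  | nil => intro s; simp [pvCekDaerahAux]
  | cons p rest ih =>
    intro s
    obtain ⟨b, k⟩ := p
    simp only [pvCekDaerahAux, List.map_cons, List.nodup_cons, List.mem_cons]
    by_cases hc : pvCell board b k ∈ s
    · have hct : PySem.Set.contains s (pvCell board b k) = true :=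
        (PySem.Set.contains_iff _ _).mpr hc
      rw [hct]
      simp only [if_true]
      constructor
      · intro h; cases h
      · rintro ⟨_, hall⟩
        exact absurd hc (hall _ (Or.inl rfl))
    · have hcf : PySem.Set.contains s (pvCell board b k) = false := by
        cases hcb : PySem.Set.contains s (pvCell board b k)
        · rfl
        · exact absurd ((PySem.Set.contains_iff _ _).mp hcb) hc
      rw [hcf]
      simp only [Bool.false_eq_true, if_false]
      rw [ih]
      constructor
      · rintro ⟨hnd, hall⟩
        refine ⟨⟨fun hm => ?_, hnd⟩, ?_⟩
        · exact hall _ hm ((PySem.Set.mem_add _ _ _).mpr (Or.inr rfl))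
        · rintro x (rfl | hx)
          · exact hc
          · intro hxs
            exact hall _ hx ((PySem.Set.mem_add _ _ _).mpr (Or.inl hxs))
      · rintro ⟨⟨hcm, hnd⟩, hall⟩
        refine ⟨hnd, fun x hx hmem => ?_⟩
        rcases (PySem.Set.mem_add _ _ _).mp hmem with hxs | rfl
        · exact hall x (Or.inr hx) hxs
        · exact hcm hx

lemma pv_ofList_length_eq_iff {α : Type} [BEq α] [LawfulBEq α] (l : List α) :
    (PySem.Set.ofList l).length = l.length ↔ l.Nodup := by
  induction l with
  | nil => simp [PySem.Set.ofList, PySem.Set.empty]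
  | cons x xs ih =>
    simp only [PySem.Set.ofList_cons, PySem.Set.discard, List.length_cons, List.nodup_cons]
    constructor
    · intro h
      have h' : (List.filter (fun y => !(y == x)) (PySem.Set.ofList xs)).length = xs.length := by
        omega
      have hle : (PySem.Set.ofList xs).length ≤ xs.length := PySem.Set.length_ofList_le xs
      have hlef : (List.filter (fun y => !(y == x)) (PySem.Set.ofList xs)).length ≤
          (PySem.Set.ofList xs).length := List.length_filter_le _ _
      have hfl : (List.filter (fun y => !(y == x)) (PySem.Set.ofList xs)).length =
          (PySem.Set.ofList xs).length := by omega
      have heq : List.filter (fun y => !(y == x)) (PySem.Set.ofList xs) = PySem.Set.ofList xs :=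
        List.filter_sublist.eq_of_length hfl
      have hxall := List.filter_eq_self.mp heq
      refine ⟨fun hx => ?_, ih.mp (by omega)⟩
      have hbad : (!(x == x)) = true := hxall x ((PySem.Set.mem_ofList xs x).mpr hx)
      simp at hbad
    · rintro ⟨hx, hnd⟩
      have hfe : List.filter (fun y => !(y == x)) xs = xs := by
        apply List.filter_eq_self.mpr
        intro a ha
        have hne : a ≠ x := fun h => hx (h ▸ ha)
        simp [hne]
      rw [PySem.Set.ofList_eq_self_of_nodup _ hnd, hfe]

lemma pvLabels_length (board : List (List String)) (perm : List Int) (n : Nat) :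
    (pvLabels board perm n).length = n := by
  simp [pvLabels, PySem.List.length_pyRange_one]

lemma pvQueen_map_cell (board : List (List String)) (perm : List Int) (n : Nat) :
    (pvQueen perm n).map (fun p => pvCell board p.1 p.2) = pvLabels board perm n := by
  simp [pvQueen, pvLabels, List.map_map, Function.comp]

lemma daerah_eq (board : List (List String)) (perm : List Int) (n : Nat) :
    cek_daerah board (pvQueen perm n) =
      (PySem.Set.len (PySem.Set.ofList (pvLabels board perm n)) == (n : Int)) := by
  rw [Bool.eq_iff_iff]
  have hnodup_iff : cek_daerah board (pvQueen perm n) = true ↔ (pvLabels board perm n).Nodup := by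
    unfold cek_daerah
    rw [daerahAux_iff, pvQueen_map_cell]
    simp [PySem.Set.empty]
  have hlen_iff :
      (PySem.Set.len (PySem.Set.ofList (pvLabels board perm n)) == (n : Int)) = true ↔
        (pvLabels board perm n).Nodup := by
    rw [beq_iff_eq]
    have h1 : PySem.Set.len (PySem.Set.ofList (pvLabels board perm n)) =
        ((PySem.Set.ofList (pvLabels board perm n)).length : Int) := by
      simp [PySem.Set.len]
    rw [h1]
    rw [show ((n : Int)) = ((pvLabels board perm n).length : Int) by
      rw [pvLabels_length]]
    rw [Int.natCast_inj]
    exact pv_ofList_length_eq_iff _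
  rw [hnodup_iff, hlen_iff]

lemma tetanggaAux_iff (pos : PySem.Set (Int × Int)) :
    ∀ (qs : List (Int × Int)),
      pvCekTetanggaAux pos qs = true ↔ ∀ p ∈ qs, pvProbe pos p.1 p.2 = false := by
  intro qs
  induction qs with
  | nil => simp [pvCekTetanggaAux]
  | cons p rest ih =>
    obtain ⟨b, k⟩ := p
    cases hp : pvProbe pos b k
    · simp [pvCekTetanggaAux, hp, ih]
    · simp [pvCekTetanggaAux, hp]

lemma tet_eq_adj (perm : List Int) (n : Nat) :
    cek_tetangga (pvQueen perm n) = pvAdjOk perm n := by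
  have hmem : ∀ u v : Int,
      PySem.Set.contains (PySem.Set.ofList (pvQueen perm n)) (u, v) = false ↔
        ¬(0 ≤ u ∧ u < (n : Int) ∧ v = PySem.List.pyGetD perm u 0) := by
    intro u v
    constructor
    · intro h hc
      have ht : PySem.Set.contains (PySem.Set.ofList (pvQueen perm n)) (u, v) = true :=
        (PySem.Set.contains_iff _ _).mpr
          ((PySem.Set.mem_ofList _ _).mpr ((mem_pvQueen perm n u v).mpr hc))
      rw [h] at ht; cases ht
    · intro h
      cases hcb : PySem.Set.contains (PySem.Set.ofList (pvQueen perm n)) (u, v)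
      · rfl
      · exact absurd ((mem_pvQueen perm n u v).mp
          ((PySem.Set.mem_ofList _ _).mp ((PySem.Set.contains_iff _ _).mp hcb))) h
  have hA : cek_tetangga (pvQueen perm n) = true ↔
      ∀ r : Int, 0 ≤ r → r < (n : Int) →
        pvProbe (PySem.Set.ofList (pvQueen perm n)) r (PySem.List.pyGetD perm r 0) = false := by
    unfold cek_tetangga
    rw [tetanggaAux_iff]
    constructor
    · intro h r h0 h1
      exact h (r, PySem.List.pyGetD perm r 0) ((mem_pvQueen perm n r _).mpr ⟨h0, h1, rfl⟩)
    · rintro h ⟨x, y⟩ hm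
      obtain ⟨h0, h1, rfl⟩ := (mem_pvQueen perm n x y).mp hm
      exact h x h0 h1
  have hB : pvAdjOk perm n = true ↔
      ∀ r : Int, 0 ≤ r → r < (n : Int) - 1 →
        1 < (PySem.List.pyGetD perm r 0 - PySem.List.pyGetD perm (r+1) 0).natAbs := by
    simp [pvAdjOk, PySem.List.mem_pyRange_one]
  rw [Bool.eq_iff_iff, hA, hB]
  constructor
  · intro h r h0 h1
    have hp := h r h0 (by omega)
    simp only [pvProbe, Bool.or_eq_false_iff, hmem] at hp
    obtain ⟨⟨⟨⟨⟨⟨⟨p1, p2⟩, p3⟩, p4⟩, p5⟩, p6⟩, p7⟩, p8⟩ := hp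
    have e6 : PySem.List.pyGetD perm r 0 - 1 ≠ PySem.List.pyGetD perm (r+1) 0 :=
      fun he => p6 ⟨by omega, by omega, he⟩
    have e7 : PySem.List.pyGetD perm r 0 ≠ PySem.List.pyGetD perm (r+1) 0 :=
      fun he => p7 ⟨by omega, by omega, he⟩
    have e8 : PySem.List.pyGetD perm r 0 + 1 ≠ PySem.List.pyGetD perm (r+1) 0 :=
      fun he => p8 ⟨by omega, by omega, he⟩
    omega
  · intro h r h0 h1
    simp only [pvProbe, Bool.or_eq_false_iff, hmem]
    refine ⟨⟨⟨⟨⟨⟨⟨?_, ?_⟩, ?_⟩, ?_⟩, ?_⟩, ?_⟩, ?_⟩, ?_⟩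
    · rintro ⟨ha, hb, hc⟩
      have h' := h (r - 1) (by omega) (by omega)
      rw [Int.sub_add_cancel] at h'
      omega
    · rintro ⟨ha, hb, hc⟩
      have h' := h (r - 1) (by omega) (by omega)
      rw [Int.sub_add_cancel] at h'
      omega
    · rintro ⟨ha, hb, hc⟩
      have h' := h (r - 1) (by omega) (by omega)
      rw [Int.sub_add_cancel] at h'
      omega
    · rintro ⟨ha, hb, hc⟩
      omega
    · rintro ⟨ha, hb, hc⟩
      omega
    · rintro ⟨ha, hb, hc⟩
      have := h r h0 (by omega)
      omega
    · rintro ⟨ha, hb, hc⟩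
      have := h r h0 (by omega)
      omega
    · rintro ⟨ha, hb, hc⟩
      have := h r h0 (by omega)
      omega

lemma kbAux_of : ∀ (qs : List (Int × Int)) (baris kolom : PySem.Set Int),
    (qs.map Prod.fst).Nodup → (qs.map Prod.snd).Nodup →
    (∀ p ∈ qs, p.1 ∉ baris) → (∀ p ∈ qs, p.2 ∉ kolom) →
    pvCekKBAux qs baris kolom = true := by
  intro qs
  induction qs with
  | nil => intro baris kolom _ _ _ _; rfl
  | cons p rest ih =>
    intro baris kolom hf hs hb hk
    obtain ⟨b, k⟩ := p
    simp only [List.map_cons, List.nodup_cons] at hf hs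
    have hb0 : PySem.Set.contains baris b = false := by
      cases hcb : PySem.Set.contains baris b
      · rfl
      · exact absurd ((PySem.Set.contains_iff _ _).mp hcb) (hb (b, k) (List.mem_cons_self ..))
    have hk0 : PySem.Set.contains kolom k = false := by
      cases hck : PySem.Set.contains kolom k
      · rfl
      · exact absurd ((PySem.Set.contains_iff _ _).mp hck) (hk (b, k) (List.mem_cons_self ..))
    simp only [pvCekKBAux, hb0, hk0, Bool.or_self, Bool.false_eq_true, if_false]
    apply ih _ _ hf.2 hs.2
    · intro p hp
      rw [PySem.Set.mem_add]
      rintro (h | h)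
      · exact hb p (List.mem_cons_of_mem _ hp) h
      · exact hf.1 (h ▸ List.mem_map_of_mem hp)
    · intro p hp
      rw [PySem.Set.mem_add]
      rintro (h | h)
      · exact hk p (List.mem_cons_of_mem _ hp) h
      · exact hs.1 (h ▸ List.mem_map_of_mem hp)

lemma kb_true (perm : List Int) (n : Nat) (hlen : perm.length = n) (hnd : perm.Nodup) :
    cek_kolom_baris (pvQueen perm n) n = true := by
  unfold cek_kolom_baris
  have hq : (pvQueen perm n).length = n := by
    simp [pvQueen, PySem.List.length_pyRange_one]
  rw [if_neg (by simp [hq])]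
  apply kbAux_of
  · have hfst : (pvQueen perm n).map Prod.fst = PySem.List.pyRange 0 (n : Int) 1 := by
      simp only [pvQueen, List.map_map]
      rw [show (Prod.fst ∘ fun r : Int => (r, PySem.List.pyGetD perm r 0)) = id from rfl,
        List.map_id]
    rw [hfst]
    apply PySem.List.nodup_pyRange_one
  · have hsnd : (pvQueen perm n).map Prod.snd = perm := by
      subst hlen
      simp only [pvQueen, List.map_map]
      have hcomp : (Prod.snd ∘ fun r : Int => (r, PySem.List.pyGetD perm r 0)) =
          fun j : Int => PySem.List.pyGetD perm j 0 := rfl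
      rw [hcomp, show ((perm.length : Int)) = PySem.List.len perm from (PySem.List.len_eq perm).symm]
      exact PySem.List.map_pyGetD_pyRange_zero perm 0
    rw [hsnd]
    exact hnd
  · intro p _
    simp [PySem.Set.empty]
  · intro p _
    simp [PySem.Set.empty]

lemma checkA_eq_checkB (board : List (List String)) (n : Nat) (p : List Int)
    (hlen : p.length = n) (hnd : p.Nodup) :
    (cek_daerah board (pvQueen p n) && cek_tetangga (pvQueen p n) &&
      cek_kolom_baris (pvQueen p n) n) = pvCheckB board n p := by
  rw [daerah_eq board p n, tet_eq_adj p n, kb_true p n hlen hnd, Bool.and_true, Bool.and_comm]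
  rfl

-- ---------- A's loop walks the chain ----------

lemma pvLoopA_succ (board : List (List String)) (n fuel : Nat) (perm : List Int) (kasus : Int) :
    pvLoopA board n (fuel+1) perm kasus =
      (if cek_daerah board (pvQueen perm n) && cek_tetangga (pvQueen perm n) &&
          cek_kolom_baris (pvQueen perm n) n then
        (some (pvQueen perm n), kasus + 1)
      else
        match bangun_permutasi perm with
        | none => (none, kasus + 1)
        | some p => pvLoopA board n fuel p (kasus + 1)) := rfl

lemma pvScan_cons (board : List (List String)) (n : Nat) (p : List Int)
    (rest : List (List Int)) (kasus : Int) :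
    pvScan board n (p :: rest) kasus =
      if pvCheckB board n p then (some (pvQueen p n), kasus + 1)
      else pvScan board n rest (kasus + 1) := rfl

lemma runA (board : List (List String)) (n : Nat) :
    ∀ (rest : List (List Int)) (p : List Int) (fuel : Nat) (kasus : Int),
      rest.length + 1 ≤ fuel →
      List.IsChain PvStep (p :: rest) →
      (∀ h, (p :: rest).getLast? = some h → bangun_permutasi h = none) →
      (∀ q ∈ p :: rest, q.length = n ∧ q.Nodup) →
      pvLoopA board n fuel p kasus = pvScan board n (p :: rest) kasus := by
  intro rest
  induction rest with
  | nil =>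
    intro p fuel kasus hf hc hl he
    obtain ⟨f, rfl⟩ : ∃ f, fuel = f + 1 := ⟨fuel - 1, by omega⟩
    rw [pvLoopA_succ, pvScan_cons]
    obtain ⟨hlen, hnd⟩ := he p (List.mem_cons_self ..)
    rw [checkA_eq_checkB board n p hlen hnd]
    by_cases hch : pvCheckB board n p = true
    · rw [if_pos hch, if_pos hch]
    · rw [if_neg hch, if_neg hch]
      rw [hl p (by simp)]
      rfl
  | cons q rest ih =>
    intro p fuel kasus hf hc hl he
    obtain ⟨f, rfl⟩ : ∃ f, fuel = f + 1 := ⟨fuel - 1, by omega⟩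
    rw [pvLoopA_succ, pvScan_cons]
    obtain ⟨hlen, hnd⟩ := he p (List.mem_cons_self ..)
    rw [checkA_eq_checkB board n p hlen hnd]
    by_cases hch : pvCheckB board n p = true
    · rw [if_pos hch, if_pos hch]
    · rw [if_neg hch, if_neg hch]
      rw [hc.rel]
      exact ih q f (kasus + 1) (by simp at hf ⊢; omega) hc.tail
        (fun h hh => hl h (by rwa [List.getLast?_cons_cons]))
        (fun r hr => he r (List.mem_cons_of_mem _ hr))

-- ---------- B's recursion scans the completions ----------

lemma solveEq (board : List (List String)) (n : Nat) :
    ∀ (pre left right : List Int) (kasus : Int),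
      pvSolve board n pre left right kasus =
        pvScan board n ((pvCompl left right).map (fun q => pre ++ q)) kasus := by
  intro pre left right kasus
  induction pre, left, right, kasus using pvSolve.induct board n with
  | case1 pre kasus hch =>
    have hr : (pvCompl [] []).map (fun q => pre ++ q) = [pre] := by
      simp [pvCompl, pvPermsOf]
    rw [pvSolve, hr]
    rfl
  | case2 pre kasus hch =>
    have hr : (pvCompl [] []).map (fun q => pre ++ q) = [pre] := by
      simp [pvCompl, pvPermsOf]
    rw [pvSolve, hr]
    rfl
  | case3 x head tail kasus =>
    have hr : (pvCompl (head :: tail) []).map (fun q => x ++ q) = [] := by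
      simp [pvCompl, pvBlocks]
    rw [pvSolve, hr]
    rfl
  | case4 pre left c rs kasus q k hsome ih1 =>
    rw [pvSolve, hsome, pvCompl_cons, List.map_append, pvScan_append]
    have hmm : (List.map (fun q => c :: q) (pvPermsOf (left ++ rs))).map (fun q => pre ++ q)
        = (pvPermsOf (left ++ rs)).map (fun q => (pre ++ [c]) ++ q) := by
      rw [List.map_map]
      apply List.map_congr_left
      intro a _
      simp
    have hcompl : pvCompl [] (left ++ rs) = pvPermsOf (left ++ rs) := by simp [pvCompl]
    rw [hcompl] at ih1
    rw [hmm, ← ih1, hsome]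
  | case5 pre left c rs kasus k hnone ih1 ih2 =>
    rw [pvSolve, hnone, pvCompl_cons, List.map_append, pvScan_append]
    have hmm : (List.map (fun q => c :: q) (pvPermsOf (left ++ rs))).map (fun q => pre ++ q)
        = (pvPermsOf (left ++ rs)).map (fun q => (pre ++ [c]) ++ q) := by
      rw [List.map_map]
      apply List.map_congr_left
      intro a _
      simp
    have hcompl : pvCompl [] (left ++ rs) = pvPermsOf (left ++ rs) := by simp [pvCompl]
    rw [hcompl] at ih1
    rw [hmm, ← ih1, hnone]
    dsimp only
    rw [ih2, pvCompl_ne_nil _ _ (by simp)]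

-- ---------- the permutation list is the next-permutation chain ----------

lemma permsFacts : ∀ (N : Nat) (t : List Int), t.length ≤ N → List.Pairwise (· < ·) t →
    (pvPermsOf t).head? = some t ∧ (pvPermsOf t).getLast? = some t.reverse ∧
    List.IsChain PvStep (pvPermsOf t) ∧ (∀ p ∈ pvPermsOf t, p.Perm t) ∧
    (pvPermsOf t).length = t.length.factorial := by
  intro N
  induction N with
  | zero =>
    intro t ht _
    have h0 : t = [] := List.eq_nil_of_length_eq_zero (by omega)
    subst h0
    rw [pvPermsOf_nil]
    exact ⟨rfl, rfl, List.IsChain.singleton _, by simp, rfl⟩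
  | succ N ihN =>
    intro t ht hp
    have Q : ∀ (rs left : List Int) (c : Int),
        left.length + rs.length + 1 ≤ N + 1 → List.Pairwise (· < ·) (left ++ c :: rs) →
        (pvBlocks left (c :: rs)).head? = some (c :: (left ++ rs)) ∧
        (pvBlocks left (c :: rs)).getLast? = some ((left ++ c :: rs).reverse) ∧
        List.IsChain PvStep (pvBlocks left (c :: rs)) ∧
        (∀ p ∈ pvBlocks left (c :: rs), p.Perm (left ++ c :: rs)) ∧
        (pvBlocks left (c :: rs)).length = (rs.length + 1) * (left.length + rs.length).factorial := by
      intro rs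
      induction rs with
      | nil =>
        intro left c hlen hpw
        obtain ⟨p1, p2, p3, p4, p5⟩ := ihN left
          (by simp only [List.length_nil] at hlen; omega)
          (List.Pairwise.sublist (List.sublist_append_left left [c]) hpw)
        have hB : pvBlocks left [c] = (pvPermsOf left).map (fun q => c :: q) := by
          rw [pvBlocks_cons, pvBlocks_nil]
          simp
        refine ⟨?_, ?_, ?_, ?_, ?_⟩
        · rw [hB, List.head?_map, p1]; simp
        · rw [hB, List.getLast?_map, p2]; simp [List.reverse_append]
        · rw [hB, List.isChain_map]
          exact List.IsChain.imp (fun a b hab => bangun_cons c a b hab) p3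
        · intro p hp'
          rw [hB] at hp'
          obtain ⟨q, hq, rfl⟩ := List.mem_map.mp hp'
          exact ((p4 q hq).cons c).trans (List.perm_append_singleton c left).symm
        · rw [hB, List.length_map, p5]; simp
      | cons c' rs2 ihR =>
        intro left c hlen hpw
        have hB := pvBlocks_cons left c (c' :: rs2)
        obtain ⟨p1, p2, p3, p4, p5⟩ := ihN (left ++ c' :: rs2)
          (by simp only [List.length_append, List.length_cons] at hlen ⊢; omega)
          (List.Pairwise.sublist
            (List.Sublist.append_left (List.sublist_cons_self c (c' :: rs2)) left) hpw)
        have hassoc : (left ++ [c]) ++ c' :: rs2 = left ++ c :: c' :: rs2 := by simp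
        obtain ⟨q1, q2, q3, q4, q5⟩ := ihR (left ++ [c]) c'
          (by simp only [List.length_append, List.length_cons, List.length_nil] at hlen ⊢; omega)
          (by rw [hassoc]; exact hpw)
        have hsplit := List.pairwise_append.mp hpw
        have hc_lt : ∀ y ∈ c' :: rs2, c < y := (List.pairwise_cons.mp hsplit.2.1).1
        have hleft_lt : ∀ y ∈ left, y < c := fun y hy => hsplit.2.2 y hy c (by simp)
        have hpne : pvPermsOf (left ++ c' :: rs2) ≠ [] := by
          intro hcon
          rw [hcon] at p1
          cases p1
        have hmapne : (pvPermsOf (left ++ c' :: rs2)).map (fun q => c :: q) ≠ [] := by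
          simpa [List.map_eq_nil_iff] using hpne
        have hblockne : pvBlocks (left ++ [c]) (c' :: rs2) ≠ [] := by
          intro hcon
          rw [hcon] at q1
          cases q1
        refine ⟨?_, ?_, ?_, ?_, ?_⟩
        · rw [hB, List.head?_append_of_ne_nil _ hmapne, List.head?_map, p1]; rfl
        · rw [hB, List.getLast?_append_of_ne_nil _ hblockne, q2, hassoc]
        · rw [hB, List.isChain_append]
          refine ⟨?_, q3, ?_⟩
          · rw [List.isChain_map]
            exact List.IsChain.imp (fun a b hab => bangun_cons c a b hab) p3
          · intro x hx y hy
            rw [List.getLast?_map, p2] at hx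
            rw [q1] at hy
            simp only [Option.map_some, Option.mem_def, Option.some.injEq] at hx hy
            subst hx
            subst hy
            have hrev : (left ++ c' :: rs2).reverse = rs2.reverse ++ [c'] ++ left.reverse := by
              simp [List.reverse_append]
            have hpw' : List.Pairwise (· > ·) (rs2.reverse ++ [c'] ++ left.reverse) := by
              rw [← hrev, List.pairwise_reverse]
              exact List.Pairwise.sublist
                (List.Sublist.append_left (List.sublist_cons_self c (c' :: rs2)) left) hpw
            have hgs' : ∀ y ∈ rs2.reverse ++ [c'], c < y := by
              intro y hy'
              apply hc_lt
              simp only [List.mem_append, List.mem_reverse, List.mem_singleton] at hy'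
              rcases hy' with h | h
              · exact List.mem_cons_of_mem _ h
              · exact h ▸ List.mem_cons_self ..
            have hls' : ∀ y ∈ left.reverse, y < c := by
              intro y hy'
              exact hleft_lt y (List.mem_reverse.mp hy')
            have hstep := bangun_desc_step c c' rs2.reverse left.reverse hpw' hgs' hls'
            show PvStep (c :: (left ++ c' :: rs2).reverse) (c' :: (left ++ [c] ++ rs2))
            unfold PvStep
            rw [hrev, hstep]
            simp
        · intro p hp'
          rw [hB] at hp'
          rcases List.mem_append.mp hp' with hp1 | hp2
          · obtain ⟨q, hq, rfl⟩ := List.mem_map.mp hp1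
            exact ((p4 q hq).cons c).trans List.perm_middle.symm
          · have hq := q4 p hp2
            rwa [hassoc] at hq
        · rw [hB, List.length_append, List.length_map, p5, q5]
          have hL : (left ++ c' :: rs2).length = left.length + (rs2.length + 1) := by
            simp only [List.length_append, List.length_cons]
          have hL2 : (left ++ [c]).length = left.length + 1 := by simp
          rw [hL, hL2]
          simp only [List.length_cons]
          rw [show left.length + 1 + rs2.length = left.length + (rs2.length + 1) from by omega]
          ring
    cases t with
    | nil =>
      rw [pvPermsOf_nil]
      exact ⟨rfl, rfl, List.IsChain.singleton _, by simp, rfl⟩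
    | cons c rs =>
      obtain ⟨h1, h2, h3, h4, h5⟩ := Q rs [] c (by simpa using ht) (by simpa using hp)
      rw [pvPermsOf_cons]
      refine ⟨by simpa using h1, by simpa using h2, h3, by simpa using h4, ?_⟩
      rw [h5]
      simp [Nat.factorial_succ]

-- ===== VERDICT (by name: the statement is the Claim_ definition above) =====
theorem hasil_bruteforce_spec : Claim_equal_hasil_bruteforce := by
  intro board skip_time _ _
  unfold Spec_hasil_bruteforce hasil_bruteforce hasil_bruteforce_alt
  by_cases hg : (!skip_time && !validasi_input board) = true
  · rw [if_pos hg, if_pos hg]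
  · rw [if_neg hg, if_neg hg]
    have hslen : (PySem.List.pyRange 0 (board.length : Int) 1).length = board.length := by
      rw [PySem.List.length_pyRange_one]
      simp
    have hpw := PySem.List.pairwise_lt_pyRange_one 0 (board.length : Int)
    obtain ⟨h1, h2, h3, h4, h5⟩ := permsFacts
      (PySem.List.pyRange 0 (board.length : Int) 1).length
      (PySem.List.pyRange 0 (board.length : Int) 1) le_rfl hpw
    rw [solveEq board board.length [] [] (PySem.List.pyRange 0 (board.length : Int) 1) 0]
    have hmapid : (pvCompl [] (PySem.List.pyRange 0 (board.length : Int) 1)).map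
        (fun q => [] ++ q) = pvPermsOf (PySem.List.pyRange 0 (board.length : Int) 1) := by
      simp [pvCompl]
    rw [hmapid]
    cases hL : pvPermsOf (PySem.List.pyRange 0 (board.length : Int) 1) with
    | nil => rw [hL] at h1; cases h1
    | cons p rest =>
      rw [hL] at h1 h2 h3 h4 h5
      have hps : p = PySem.List.pyRange 0 (board.length : Int) 1 := by
        simpa using h1
      rw [← hps]
      apply runA
      · rw [hslen] at h5
        simp only [List.length_cons] at h5
        omega
      · exact h3
      · intro h hh
        have hh' : h = (PySem.List.pyRange 0 (board.length : Int) 1).reverse := by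
          rw [h2] at hh
          exact (Option.some.inj hh).symm
        subst hh'
        apply bangun_desc_none
        rw [List.pairwise_reverse]
        exact hpw
      · intro q hq
        have hperm := h4 q hq
        refine ⟨hperm.length_eq.trans hslen, ?_⟩
        exact hperm.nodup_iff.mpr (PySem.List.nodup_pyRange_one 0 _)
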